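-- pv_equiv track=rewrite | github.com/kodsnack/advent_of_code_2020 | jakobruhe-python3/day06.py | split_in_groups
-- ===== SOURCE A (Python) =====
-- def split_in_groups(entries):
--     groups = []
--     group = []
--     for e in entries:
--         if e:
--             group.append(e)
--         elif group:
--             groups.append(group)
--             group = []
--     if group:
--         groups.append(group)
--     return groups
-- ===== SOURCE B (Python) =====
-- def split_in_groups(entries):
--     groups = []
--     i = 0
--     n = len(entries)
--     while i < n:
--         if entries[i]:
--             j = i
--             while j < n and entries[j]:
--                 j += 1
--             groups.append(entries[i:j])
--             i = j
--         else:
--             i += 1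
--     return groups
-- ===== Notes on version B (the rewrite author's own statement) =====
-- stated objective: alternative
-- what changed: B extracts each maximal run of truthy entries with a two-pointer scan and a slice, instead of maintaining a current-group accumulator that is flushed at blank separators and once more at the end.
import Mathlib
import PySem

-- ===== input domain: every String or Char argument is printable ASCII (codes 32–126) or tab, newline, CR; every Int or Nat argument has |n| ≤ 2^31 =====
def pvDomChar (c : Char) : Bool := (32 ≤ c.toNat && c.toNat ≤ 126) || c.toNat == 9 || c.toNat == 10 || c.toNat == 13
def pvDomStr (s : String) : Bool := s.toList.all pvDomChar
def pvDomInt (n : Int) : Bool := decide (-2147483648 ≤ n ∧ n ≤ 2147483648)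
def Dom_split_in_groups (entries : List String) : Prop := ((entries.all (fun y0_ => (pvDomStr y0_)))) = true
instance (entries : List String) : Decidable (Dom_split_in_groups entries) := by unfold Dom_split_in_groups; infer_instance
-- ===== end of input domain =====

-- B groups by extracting maximal runs of nonempty strings (two-pointer/takeWhile) instead of A's flushed accumulator; return values proved equal on all inputs.

-- ===== PORT A =====
-- A: fold over entries with state (groups, group); append e to group if truthy,
-- else flush a nonempty group; final flush after the loop.
def split_in_groups (entries : List String) : List (List String) :=
  let s := entries.foldl
    (fun (s : List (List String) × List String) e =>
      if e ≠ "" then (s.1, s.2 ++ [e])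
      else if s.2 ≠ [] then (s.1 ++ [s.2], [])
      else s)
    ([], [])
  if s.2 ≠ [] then s.1 ++ [s.2] else s.1

-- ===== PORT B =====
-- B: skip falsy entries; at a truthy entry take the maximal run (the slice
-- entries[i:j] = the longest nonempty prefix) and continue after it.
def split_in_groups_alt (entries : List String) : List (List String) :=
  match entries with
  | [] => []
  | e :: rest =>
    if e ≠ "" then
      (e :: rest.takeWhile (· ≠ "")) :: split_in_groups_alt (rest.dropWhile (· ≠ ""))
    else
      split_in_groups_alt rest
  termination_by entries.length
  decreasing_by
    · simpa using Nat.lt_succ_of_le (List.length_dropWhile_le _ rest)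
    · simp

-- ===== PRECONDITION & SPEC =====
def Spec_split_in_groups (entries : List String) (out : List (List String)) : Prop := out = split_in_groups_alt entries
instance (entries : List String) (out : List (List String)) : Decidable (Spec_split_in_groups entries out) := by unfold Spec_split_in_groups; infer_instance

-- ===== CLAIM (what is proved, stated in full; the proofs are below) =====
def Claim_equal_split_in_groups : Prop := ∀ (entries : List String), Dom_split_in_groups entries → Spec_split_in_groups entries (split_in_groups entries)

-- ===== LEMMAS AND PROOFS =====

-- Abstract characterisation of A's remaining computation from state (groups, group).
def pvRun (group : List String) : List String → List (List String)
  | [] => if group = [] then [] else [group]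
  | e :: rest =>
    if e ≠ "" then pvRun (group ++ [e]) rest
    else (if group = [] then [] else [group]) ++ pvRun [] rest

def pvStep (s : List (List String) × List String) (e : String) : List (List String) × List String :=
  if e ≠ "" then (s.1, s.2 ++ [e])
  else if s.2 ≠ [] then (s.1 ++ [s.2], [])
  else s

def pvFinish (s : List (List String) × List String) : List (List String) :=
  if s.2 ≠ [] then s.1 ++ [s.2] else s.1

lemma loop_eq_run (entries : List String) :
    ∀ (groups : List (List String)) (group : List String),
      pvFinish (entries.foldl pvStep (groups, group)) = groups ++ pvRun group entries := by
  induction entries with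
  | nil =>
      intro groups group
      by_cases h : group = [] <;> simp [pvFinish, pvRun, h]
  | cons e rest ih =>
      intro groups group
      by_cases he : e = ""
      · by_cases hg : group = []
        · have hstep : pvStep (groups, group) e = (groups, group) := by
            simp [pvStep, he, hg]
          rw [List.foldl_cons, hstep, ih]
          simp [pvRun, he, hg]
        · have hstep : pvStep (groups, group) e = (groups ++ [group], []) := by
            simp [pvStep, he, hg]
          rw [List.foldl_cons, hstep, ih]
          simp [pvRun, he, hg]
      · have hstep : pvStep (groups, group) e = (groups, group ++ [e]) := by
          simp [pvStep, he]
        rw [List.foldl_cons, hstep, ih]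
        simp [pvRun, he]

lemma run_eq_alt (entries : List String) :
    ∀ group : List String,
      pvRun group entries =
        if group = [] then split_in_groups_alt entries
        else (group ++ entries.takeWhile (· ≠ "")) :: split_in_groups_alt (entries.dropWhile (· ≠ "")) := by
  induction entries with
  | nil =>
      intro group
      by_cases hg : group = [] <;> simp [pvRun, split_in_groups_alt, hg]
  | cons e rest ih =>
      intro group
      by_cases he : e = ""
      · by_cases hg : group = [] <;>
          simp [pvRun, he, hg, split_in_groups_alt, ih [], List.takeWhile, List.dropWhile]
      · have h1 := ih (group ++ [e])
        simp only [decide_not] at h1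
        rw [if_neg (by simp)] at h1
        by_cases hg : group = []
        · subst hg
          simpa [pvRun, he, split_in_groups_alt, List.takeWhile, List.dropWhile, decide_not] using h1
        · simp [pvRun, he, hg, h1, List.takeWhile, List.dropWhile, decide_not]

-- ===== VERDICT (by name: the statement is the Claim_ definition above) =====
theorem split_in_groups_spec : Claim_equal_split_in_groups := by
  intro entries _
  show split_in_groups entries = split_in_groups_alt entries
  have h0 : split_in_groups entries = pvFinish (entries.foldl pvStep ([], [])) := rfl
  rw [h0, loop_eq_run entries [] []]
  simpa using run_eq_alt entries []
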